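-- pv_equiv track=rewrite | github.com/barrand/BookWash | scripts/bookwash_llm.py | obfuscate_word
-- ===== SOURCE A (Python) =====
-- def obfuscate_word(word: str) -> str:
--     """Obfuscate a profane word by replacing a vowel with *.
--
--     Examples: shit -> sh*t, fuck -> f*ck, asshole -> *sshole
--     """
--     vowels = 'aeiouAEIOU'
--     result = list(word)
--     for i, char in enumerate(result):
--         if char in vowels:
--             result[i] = '*'
--             break
--     return ''.join(result)
-- ===== SOURCE B (Python) =====
-- import re
--
-- def obfuscate_word(word: str) -> str:
--     return re.sub(r'[aeiouAEIOU]', '*', word, count=1)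
-- ===== Notes on version B (the rewrite author's own statement) =====
-- stated objective: idiomatic
-- what changed: Replaced the manual list conversion, enumerate loop and break with a single regex substitution (re.sub with count=1), which replaces exactly the first vowel.
import Mathlib
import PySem

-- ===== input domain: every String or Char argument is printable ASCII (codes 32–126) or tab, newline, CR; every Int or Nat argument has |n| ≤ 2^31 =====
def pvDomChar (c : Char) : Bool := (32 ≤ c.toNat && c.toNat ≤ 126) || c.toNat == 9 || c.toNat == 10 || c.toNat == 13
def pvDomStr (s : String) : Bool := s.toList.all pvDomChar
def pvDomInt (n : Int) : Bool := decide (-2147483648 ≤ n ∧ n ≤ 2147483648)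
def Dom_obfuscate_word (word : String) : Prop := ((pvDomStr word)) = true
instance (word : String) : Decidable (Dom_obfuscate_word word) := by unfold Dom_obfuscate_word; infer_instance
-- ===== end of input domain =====

-- B replaces A's enumerate-and-mutate loop with one regex substitution (re.sub, count=1): idiomatic, same cost.


-- ===== PORT A =====
-- vowels = 'aeiouAEIOU'
def pvVowelsA : List Char := "aeiouAEIOU".toList

-- the `for i, char in enumerate(result): if char in vowels: result[i] = '*'; break` loop:
-- walks the enumerated pairs, and on the first vowel sets that index of `result` and stops.
def pvLoopA : List (Int × Char) → List Char → List Char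
  | [], res => res
  | (i, c) :: rest, res => if pvVowelsA.contains c then res.set i.toNat '*' else pvLoopA rest res

def obfuscate_word (word : String) : String :=
  String.ofList (pvLoopA (PySem.List.enumerate word.toList 0) word.toList)   -- result = list(word); ''.join(result)

-- ===== PORT B =====
-- re.sub(r'[aeiouAEIOU]', '*', word, count=1): scan left to right, replace the first
-- character matching the class with '*', keep everything else.
def pvSubFirst : List Char → List Char
  | [] => []
  | c :: cs => if "aeiouAEIOU".toList.contains c then '*' :: cs else c :: pvSubFirst cs

def obfuscate_word_alt (word : String) : String := String.ofList (pvSubFirst word.toList)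

-- ===== PRECONDITION & SPEC =====
def Spec_obfuscate_word (word : String) (out : String) : Prop := out = obfuscate_word_alt word
instance (word : String) (out : String) : Decidable (Spec_obfuscate_word word out) := by unfold Spec_obfuscate_word; infer_instance

-- ===== CLAIM (what is proved, stated in full; the proofs are below) =====
def Claim_equal_obfuscate_word : Prop := ∀ (word : String), Dom_obfuscate_word word → Spec_obfuscate_word word (obfuscate_word word)

-- ===== LEMMAS AND PROOFS =====
theorem pvLoopA_eq (l : List Char) : ∀ (pre : List Char),
    pvLoopA (PySem.List.enumerate l (pre.length : Int)) (pre ++ l) = pre ++ pvSubFirst l := by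
  induction l with
  | nil => intro pre; simp [pvLoopA, pvSubFirst, PySem.List.enumerate]
  | cons c cs ih =>
    intro pre
    by_cases h : c ∈ pvVowelsA
    · have hb : pvVowelsA.contains c = true := by simpa [pvVowelsA] using h
      have hb' : ("aeiouAEIOU".toList.contains c) = true := hb
      simp only [pvLoopA, pvSubFirst, PySem.List.enumerate_cons, hb, hb', if_true]
      simp
    · have hb : pvVowelsA.contains c = false := by simpa [pvVowelsA] using h
      have hb' : ("aeiouAEIOU".toList.contains c) = false := hb
      have hrec := ih (pre ++ [c])
      simp only [List.length_append, List.length_cons, List.length_nil, List.append_assoc,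
        List.cons_append, List.nil_append] at hrec
      push_cast at hrec
      simp only [pvLoopA, pvSubFirst, PySem.List.enumerate_cons, hb, hb', Bool.false_eq_true,
        if_false]
      exact hrec

-- ===== VERDICT (by name: the statement is the Claim_ definition above) =====
theorem obfuscate_word_spec : Claim_equal_obfuscate_word := by
  intro word _
  unfold Spec_obfuscate_word obfuscate_word obfuscate_word_alt
  have h := pvLoopA_eq word.toList []
  simp at h
  exact congrArg String.ofList h
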